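-- pv_equiv track=rewrite | github.com/Chapsone/PathFInding-Algorithm | mapping_localisation_pp.py | augmented_matrix
-- ===== SOURCE A (Python) =====
-- import copy
--
-- def augmented_matrix(matrix_grid):
--     rows = len(matrix_grid)
--     cols = len(matrix_grid[0])
--     gap = 3
--     augmented_matrix_grid = copy.deepcopy(matrix_grid)
--     for i in range(gap, rows - gap):
--         for j in range(gap, cols - gap):
--             if matrix_grid[i][j] == 0:
--                 for a in range(-gap, gap + 1):
--                     for b in range(-gap, gap + 1):
--                         augmented_matrix_grid[i+a][j+b] = 0
--
--     return augmented_matrix_grid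
-- ===== SOURCE B (Python) =====
-- def augmented_matrix(matrix_grid):
--     rows = len(matrix_grid)
--     cols = len(matrix_grid[0])
--     gap = 3
--     src = [[gap <= i <= rows - 1 - gap and gap <= j <= cols - 1 - gap
--             and matrix_grid[i][j] == 0
--             for j in range(cols)] for i in range(rows)]
--     hor = [[any(src[i][max(0, j - gap):j + gap + 1])
--             for j in range(cols)] for i in range(rows)]
--     full = [[any(hor[p][j] for p in range(max(0, i - gap), min(rows, i + gap + 1)))
--              for j in range(cols)] for i in range(rows)]
--     return [[0 if (j < cols and full[i][j]) else v
--              for j, v in enumerate(row)] for i, row in enumerate(matrix_grid)]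
-- ===== Notes on version B (the rewrite author's own statement) =====
-- stated objective: alternative
-- what changed: Replaces A's in-place 4-nested scatter (each interior zero overwrites its 7x7 neighborhood) by a pure separable pipeline: a seed mask, a horizontal 7-wide OR pass, a vertical 7-wide OR pass, then a single rebuild of the grid from the combined mask.
import Mathlib
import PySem

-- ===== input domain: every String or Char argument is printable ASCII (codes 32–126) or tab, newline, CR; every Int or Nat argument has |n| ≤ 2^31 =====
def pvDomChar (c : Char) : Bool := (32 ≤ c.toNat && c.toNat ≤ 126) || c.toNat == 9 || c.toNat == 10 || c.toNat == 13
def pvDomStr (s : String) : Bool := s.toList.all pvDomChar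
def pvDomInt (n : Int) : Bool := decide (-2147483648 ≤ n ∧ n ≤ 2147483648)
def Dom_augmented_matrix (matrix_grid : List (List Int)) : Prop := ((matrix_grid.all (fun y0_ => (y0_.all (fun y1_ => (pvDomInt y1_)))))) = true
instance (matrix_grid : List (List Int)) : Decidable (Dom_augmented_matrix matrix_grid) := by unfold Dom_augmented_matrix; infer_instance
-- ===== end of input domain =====

-- B replaces A's in-place 4-nested 7x7 scatter by a separable pure pipeline (seed mask, horizontal
-- window pass, vertical window pass, rebuild); objective: alternative decomposition, same exact values.


-- ===== PORT A =====
-- writes augmented_matrix_grid[i+a][j+b] = 0; both indices are ≥ 0 at every call site (i,j ≥ gap = 3,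
-- a,b ≥ -gap), so .toNat is exact; an out-of-range write (IndexError in Python) is a no-op here,
-- and Pre_ excludes those inputs.
def pvSetz (g : List (List Int)) (i j : Int) : List (List Int) :=
  g.modify i.toNat (fun row => List.set row j.toNat 0)

def augmented_matrix (matrix_grid : List (List Int)) : List (List Int) :=
  let rows : Int := matrix_grid.length
  let cols : Int := (PySem.List.pyGetD matrix_grid 0 []).length
  let gap : Int := 3
  (PySem.List.pyRange gap (rows - gap) 1).foldl (fun g i =>
    (PySem.List.pyRange gap (cols - gap) 1).foldl (fun g j =>
      if PySem.List.pyGetD (PySem.List.pyGetD matrix_grid i []) j 0 = 0 then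
        (PySem.List.pyRange (-gap) (gap + 1) 1).foldl (fun g a =>
          (PySem.List.pyRange (-gap) (gap + 1) 1).foldl (fun g b =>
            pvSetz g (i + a) (j + b)) g) g
      else g) g) matrix_grid

-- ===== PORT B =====
def augmented_matrix_alt (matrix_grid : List (List Int)) : List (List Int) :=
  let rows : Int := matrix_grid.length
  let cols : Int := (PySem.List.pyGetD matrix_grid 0 []).length
  let gap : Int := 3
  let src : List (List Bool) := (PySem.List.pyRange 0 rows 1).map (fun i =>
    (PySem.List.pyRange 0 cols 1).map (fun j =>
      decide (gap ≤ i ∧ i ≤ rows - 1 - gap ∧ gap ≤ j ∧ j ≤ cols - 1 - gap ∧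
        PySem.List.pyGetD (PySem.List.pyGetD matrix_grid i []) j 0 = 0)))
  let hor : List (List Bool) := (PySem.List.pyRange 0 rows 1).map (fun i =>
    (PySem.List.pyRange 0 cols 1).map (fun j =>
      (PySem.List.slice (PySem.List.pyGetD src i []) (some (max 0 (j - gap))) (some (j + gap + 1))).any id))
  let full : List (List Bool) := (PySem.List.pyRange 0 rows 1).map (fun i =>
    (PySem.List.pyRange 0 cols 1).map (fun j =>
      (PySem.List.pyRange (max 0 (i - gap)) (min rows (i + gap + 1)) 1).any (fun p =>
        PySem.List.pyGetD (PySem.List.pyGetD hor p []) j false)))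
  (PySem.List.enumerate matrix_grid 0).map (fun ir =>
    (PySem.List.enumerate ir.2 0).map (fun jv =>
      if jv.1 < cols ∧ PySem.List.pyGetD (PySem.List.pyGetD full ir.1 []) jv.1 false = true then 0 else jv.2))

-- ===== PRECONDITION & SPEC =====
-- Pre_ excludes the empty grid (A raises IndexError on matrix_grid[0]) and non-rectangular grids with
-- more than 6 rows and more than 6 columns, on which A's unguarded interior reads and 7x7 scatter
-- writes generally raise IndexError (A returns only when the raggedness happens to miss the scanned window).
def Pre_augmented_matrix (matrix_grid : List (List Int)) : Prop :=
  matrix_grid ≠ [] ∧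
    (matrix_grid.all (fun row => row.length = (matrix_grid.getD 0 []).length) = true ∨
      matrix_grid.length ≤ 6 ∨ (matrix_grid.getD 0 []).length ≤ 6)
instance (matrix_grid : List (List Int)) : Decidable (Pre_augmented_matrix matrix_grid) := by
  unfold Pre_augmented_matrix; infer_instance

def pvWitness_augmented_matrix : List (List Int) :=
  [[1, 1, 1, 1, 1, 1, 1], [1, 1, 1, 1, 1, 1, 1], [1, 1, 1, 1, 1, 1, 1], [1, 1, 1, 0, 1, 1, 1],
   [1, 1, 1, 1, 1, 1, 1], [1, 1, 1, 1, 1, 1, 1], [1, 1, 1, 1, 1, 1, 1]]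

def Spec_augmented_matrix (matrix_grid : List (List Int)) (out : List (List Int)) : Prop := out = augmented_matrix_alt matrix_grid
instance (matrix_grid : List (List Int)) (out : List (List Int)) : Decidable (Spec_augmented_matrix matrix_grid out) := by unfold Spec_augmented_matrix; infer_instance

-- ===== CLAIM (what is proved, stated in full; the proofs are below) =====
def Claim_equal_augmented_matrix : Prop := ∀ (matrix_grid : List (List Int)), Dom_augmented_matrix matrix_grid → Pre_augmented_matrix matrix_grid → Spec_augmented_matrix matrix_grid (augmented_matrix matrix_grid)

-- ===== LEMMAS AND PROOFS =====

-- the cell of g at (x, y), 0 outside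
def pvPeek (g : List (List Int)) (x y : Nat) : Int := (g.getD x []).getD y 0

-- (x, y) is within Chebyshev distance 3 of an interior zero cell of m
def pvCov (m : List (List Int)) (x y : Nat) : Prop :=
  ∃ p q : Int, 3 ≤ p ∧ p ≤ (m.length : Int) - 4 ∧ 3 ≤ q ∧ q ≤ ((m.getD 0 []).length : Int) - 4 ∧
    PySem.List.pyGetD (PySem.List.pyGetD m p []) q 0 = 0 ∧
    p - 3 ≤ (x : Int) ∧ (x : Int) ≤ p + 3 ∧ q - 3 ≤ (y : Int) ∧ (y : Int) ≤ q + 3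

-- the flat list of (row, column) targets of all of A's zero writes
def pvWrites (m : List (List Int)) : List (Int × Int) :=
  (PySem.List.pyRange 3 ((m.length : Int) - 3) 1).flatMap (fun i =>
    ((PySem.List.pyRange 3 (((m.getD 0 []).length : Int) - 3) 1).filter (fun j =>
        decide (PySem.List.pyGetD (PySem.List.pyGetD m i []) j 0 = 0))).flatMap (fun j =>
      (PySem.List.pyRange (-3) 4 1).flatMap (fun a =>
        (PySem.List.pyRange (-3) 4 1).map (fun b => (i + a, j + b)))))

theorem pvA_eq_flat (m : List (List Int)) :
    augmented_matrix m = (pvWrites m).foldl (fun g e => pvSetz g e.1 e.2) m := by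
  simp only [augmented_matrix, pvWrites, List.foldl_flatMap, List.foldl_filter,
    List.foldl_map, decide_eq_true_eq, PySem.List.pyGetD_zero]
  norm_num

theorem pvLen_setz (g : List (List Int)) (i j : Int) : (pvSetz g i j).length = g.length := by
  simp [pvSetz]

theorem pvRowlen_setz (g : List (List Int)) (i j : Int) (x : Nat) :
    ((pvSetz g i j).getD x []).length = (g.getD x []).length := by
  simp only [pvSetz, List.getD_eq_getElem?_getD, List.getElem?_modify]
  cases g[x]? <;> simp
  split <;> simp

theorem pvPeek_setz (g : List (List Int)) (i j : Int) (hi : 0 ≤ i) (hj : 0 ≤ j) (x y : Nat) :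
    pvPeek (pvSetz g i j) x y =
      if (x : Int) = i ∧ (y : Int) = j ∧ x < g.length ∧ y < (g.getD x []).length then 0
      else pvPeek g x y := by
  simp only [pvPeek, pvSetz, List.getD_eq_getElem?_getD, List.getElem?_modify]
  rcases hgx : g[x]? with _ | row
  · have hxlen : ¬ x < g.length := by rw [List.getElem?_eq_none_iff] at hgx; omega
    simp [hxlen]
  · obtain ⟨hxlen, -⟩ := List.getElem?_eq_some_iff.mp hgx
    by_cases hxi : i.toNat = x
    · have hxi' : (x : Int) = i := by omega
      simp only [hxi, if_pos rfl, Option.map_some]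
      rcases hry : row[y]? with _ | v
      · have hylen : ¬ y < row.length := by rw [List.getElem?_eq_none_iff] at hry; omega
        simp [List.getD_eq_getElem?_getD, List.getElem?_set, hxi', hxlen, hylen]
      · obtain ⟨hylen, -⟩ := List.getElem?_eq_some_iff.mp hry
        by_cases hyj : y = j.toNat
        · have hyj' : (y : Int) = j := by omega
          have hjr : j.toNat < row.length := by omega
          simp [List.getElem?_set, hxi', hxlen, hylen, hyj', hyj, hry, hjr, hj]
        · have : ¬ (y : Int) = j := by omega
          simp [List.getD_eq_getElem?_getD, List.getElem?_set, hxi', hxlen, this, hyj, hry,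
            Ne.symm hyj]
    · have : ¬ (x : Int) = i := by omega
      simp [hxi, this]

theorem pvLen_foldl (L : List (Int × Int)) (g : List (List Int)) :
    (L.foldl (fun g e => pvSetz g e.1 e.2) g).length = g.length := by
  induction L generalizing g with
  | nil => rfl
  | cons e t ih => simp [List.foldl_cons, ih, pvLen_setz]

theorem pvRowlen_foldl (L : List (Int × Int)) (g : List (List Int)) (x : Nat) :
    ((L.foldl (fun g e => pvSetz g e.1 e.2) g).getD x []).length = (g.getD x []).length := by
  induction L generalizing g with
  | nil => rfl
  | cons e t ih => rw [List.foldl_cons, ih, pvRowlen_setz]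

theorem pvPeek_foldl (L : List (Int × Int)) (hL : ∀ e ∈ L, 0 ≤ e.1 ∧ 0 ≤ e.2)
    (g : List (List Int)) (x y : Nat) :
    pvPeek (L.foldl (fun g e => pvSetz g e.1 e.2) g) x y =
      if (∃ e ∈ L, (x : Int) = e.1 ∧ (y : Int) = e.2) ∧ x < g.length ∧ y < (g.getD x []).length then 0
      else pvPeek g x y := by
  induction L generalizing g with
  | nil => simp
  | cons e t ih =>
    obtain ⟨he1, he2⟩ := hL e List.mem_cons_self
    rw [List.foldl_cons, ih (fun e he => hL e (List.mem_cons_of_mem _ he)),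
      pvLen_setz, pvRowlen_setz, pvPeek_setz g e.1 e.2 he1 he2]
    have hmem : (∃ e' ∈ e :: t, (x : Int) = e'.1 ∧ (y : Int) = e'.2) ↔
        (((x : Int) = e.1 ∧ (y : Int) = e.2) ∨ ∃ e' ∈ t, (x : Int) = e'.1 ∧ (y : Int) = e'.2) := by
      constructor
      · rintro ⟨e', he', hp⟩
        rcases List.mem_cons.mp he' with rfl | hm
        · exact Or.inl hp
        · exact Or.inr ⟨e', hm, hp⟩
      · rintro (hp | ⟨e', hm, hp⟩)
        · exact ⟨e, List.mem_cons_self, hp⟩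
        · exact ⟨e', List.mem_cons_of_mem _ hm, hp⟩
    clear ih hL
    simp only [hmem]
    by_cases hT : ∃ e' ∈ t, (x : Int) = e'.1 ∧ (y : Int) = e'.2 <;>
      by_cases hE : (x : Int) = e.1 ∧ (y : Int) = e.2 <;>
        by_cases hX : x < g.length <;>
          by_cases hY : y < (g.getD x []).length <;>
            simp [hT, hE, hX, hY] <;> (intros; omega)

theorem pvMem_writes (m : List (List Int)) (x y : Nat) :
    ((∃ e ∈ pvWrites m, (x : Int) = e.1 ∧ (y : Int) = e.2) ↔ pvCov m x y) := by
  constructor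
  · rintro ⟨e, he, hx, hy⟩
    simp only [pvWrites, List.mem_flatMap, List.mem_map, List.mem_filter,
      PySem.List.mem_pyRange_one, decide_eq_true_eq] at he
    obtain ⟨i, ⟨hi1, hi2⟩, j, ⟨⟨hj1, hj2⟩, hj0⟩, a, ⟨ha1, ha2⟩, b, ⟨hb1, hb2⟩, rfl⟩ := he
    exact ⟨i, j, by omega, by omega, by omega, by omega, hj0, by simp at hx hy ⊢; omega,
      by simp at hx hy ⊢; omega, by simp at hx hy ⊢; omega, by simp at hx hy ⊢; omega⟩
  · rintro ⟨p, q, h1, h2, h3, h4, h0, h5, h6, h7, h8⟩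
    refine ⟨(p + ((x : Int) - p), q + ((y : Int) - q)), ?_, by simp, by simp⟩
    simp only [pvWrites, List.mem_flatMap, List.mem_map, List.mem_filter,
      PySem.List.mem_pyRange_one, decide_eq_true_eq]
    exact ⟨p, ⟨by omega, by omega⟩, q, ⟨⟨by omega, by omega⟩, h0⟩,
      (x : Int) - p, ⟨by omega, by omega⟩, (y : Int) - q, ⟨by omega, by omega⟩, rfl⟩

theorem pvWrites_nonneg (m : List (List Int)) : ∀ e ∈ pvWrites m, 0 ≤ e.1 ∧ 0 ≤ e.2 := by
  intro e he
  simp only [pvWrites, List.mem_flatMap, List.mem_map, List.mem_filter,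
    PySem.List.mem_pyRange_one, decide_eq_true_eq] at he
  obtain ⟨i, ⟨hi1, hi2⟩, j, ⟨⟨hj1, hj2⟩, hj0⟩, a, ⟨ha1, ha2⟩, b, ⟨hb1, hb2⟩, rfl⟩ := he
  constructor <;> simp <;> omega

theorem pvA_char0 (m : List (List Int)) (x y : Nat) (h : pvCov m x y)
    (hx : x < m.length) (hy : y < (m.getD x []).length) :
    pvPeek (augmented_matrix m) x y = 0 := by
  rw [pvA_eq_flat, pvPeek_foldl _ (pvWrites_nonneg m)]
  have hy' : y < m[x].length := by
    simpa [List.getD_eq_getElem?_getD, List.getElem?_eq_getElem hx] using hy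
  simp [(pvMem_writes m x y).2 h, hx, hy']

theorem pvA_char1 (m : List (List Int)) (x y : Nat) (h : ¬ pvCov m x y) :
    pvPeek (augmented_matrix m) x y = pvPeek m x y := by
  rw [pvA_eq_flat, pvPeek_foldl _ (pvWrites_nonneg m)]
  simp [(pvMem_writes m x y).not.2 h]

theorem pvA_len (m : List (List Int)) : (augmented_matrix m).length = m.length := by
  rw [pvA_eq_flat]; exact pvLen_foldl _ _

theorem pvA_rowlen (m : List (List Int)) (x : Nat) :
    ((augmented_matrix m).getD x []).length = (m.getD x []).length := by
  rw [pvA_eq_flat]; exact pvRowlen_foldl _ _ _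

def pvSrc (m : List (List Int)) : List (List Bool) :=
  (PySem.List.pyRange 0 (m.length : Int) 1).map (fun i =>
    (PySem.List.pyRange 0 ((PySem.List.pyGetD m 0 []).length : Int) 1).map (fun j =>
      decide (3 ≤ i ∧ i ≤ (m.length : Int) - 1 - 3 ∧ 3 ≤ j ∧
        j ≤ ((PySem.List.pyGetD m 0 []).length : Int) - 1 - 3 ∧
        PySem.List.pyGetD (PySem.List.pyGetD m i []) j 0 = 0)))

def pvHor (m : List (List Int)) : List (List Bool) :=
  (PySem.List.pyRange 0 (m.length : Int) 1).map (fun i =>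
    (PySem.List.pyRange 0 ((PySem.List.pyGetD m 0 []).length : Int) 1).map (fun j =>
      (PySem.List.slice (PySem.List.pyGetD (pvSrc m) i []) (some (max 0 (j - 3)))
        (some (j + 3 + 1))).any id))

def pvFullL (m : List (List Int)) : List (List Bool) :=
  (PySem.List.pyRange 0 (m.length : Int) 1).map (fun i =>
    (PySem.List.pyRange 0 ((PySem.List.pyGetD m 0 []).length : Int) 1).map (fun j =>
      (PySem.List.pyRange (max 0 (i - 3)) (min (m.length : Int) (i + 3 + 1)) 1).any (fun p =>
        PySem.List.pyGetD (PySem.List.pyGetD (pvHor m) p []) j false)))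

theorem pvB_unfold (m : List (List Int)) :
    augmented_matrix_alt m =
      (PySem.List.enumerate m 0).map (fun ir =>
        (PySem.List.enumerate ir.2 0).map (fun jv =>
          if jv.1 < ((PySem.List.pyGetD m 0 []).length : Int) ∧
              PySem.List.pyGetD (PySem.List.pyGetD (pvFullL m) ir.1 []) jv.1 false = true then 0
          else jv.2)) := by
  simp only [augmented_matrix_alt, pvFullL, pvHor, pvSrc]
  rfl

theorem pvAny_drop_take (l : List Bool) (a n : Nat) :
    ((l.drop a).take n).any id = true ↔
      ∃ q : Nat, a ≤ q ∧ q < a + n ∧ ∃ h : q < l.length, l[q] = true := by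
  rw [List.any_eq_true]
  constructor
  · rintro ⟨b, hb, hbt⟩
    obtain ⟨k, hk, rfl⟩ := List.mem_iff_getElem.mp hb
    have hk' := hk
    simp [List.length_take, List.length_drop] at hk'
    refine ⟨a + k, by omega, by omega, by omega, ?_⟩
    simpa [List.getElem_take, List.getElem_drop] using hbt
  · rintro ⟨q, h1, h2, h3, h4⟩
    refine ⟨l[q], List.mem_iff_getElem.mpr ⟨q - a, by simp; omega, ?_⟩, by simpa using h4⟩
    rw [List.getElem_take, List.getElem_drop]
    congr 1
    omega

theorem pvFull_iff (m : List (List Int)) (x y : Nat) (hx : x < m.length)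
    (hy : y < (PySem.List.pyGetD m 0 []).length) :
    (PySem.List.pyGetD (PySem.List.pyGetD (pvFullL m) (x : Int) []) (y : Int) false = true) ↔
      pvCov m x y := by
  rw [pvFullL, PySem.List.pyGetD_map_pyRange _ _ _ _ hx,
    PySem.List.pyGetD_map_pyRange _ _ _ _ hy, List.any_eq_true]
  constructor
  · rintro ⟨p, hp, hval⟩
    rw [PySem.List.mem_pyRange_one] at hp
    rw [pvHor, PySem.List.pyGetD_map_pyRange_of_nonneg _ _ _ _ (by omega) (by omega),
      PySem.List.pyGetD_map_pyRange _ _ _ _ hy, pvSrc,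
      PySem.List.pyGetD_map_pyRange_of_nonneg _ _ _ _ (by omega) (by omega),
      PySem.List.slice_toNat _ (by omega) (by omega), pvAny_drop_take] at hval
    obtain ⟨q, hq1, hq2, hq3, hq4⟩ := hval
    have hqC : q < (PySem.List.pyGetD m 0 []).length := by
      simpa [PySem.List.length_pyRange_one] using hq3
    rw [List.getElem_map, PySem.List.getElem_pyRange_one] at hq4
    simp only [decide_eq_true_eq, zero_add] at hq4
    obtain ⟨hs1, hs2, hs3, hs4, hs0⟩ := hq4
    refine ⟨p, (q : Int), by omega, ?_, by omega, ?_, hs0, by omega, by omega, ?_, ?_⟩ <;>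
      simp only [PySem.List.pyGetD_zero] at * <;> omega
  · rintro ⟨p, q, h1, h2, h3, h4, h0, h5, h6, h7, h8⟩
    have hC : ((m.getD 0 []).length : Int) = ((PySem.List.pyGetD m 0 []).length : Int) := by
      rw [PySem.List.pyGetD_zero]
    refine ⟨p, ?_, ?_⟩
    · rw [PySem.List.mem_pyRange_one]; omega
    · rw [pvHor, PySem.List.pyGetD_map_pyRange_of_nonneg _ _ _ _ (by omega) (by omega),
        PySem.List.pyGetD_map_pyRange _ _ _ _ hy, pvSrc,
        PySem.List.pyGetD_map_pyRange_of_nonneg _ _ _ _ (by omega) (by omega),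
        PySem.List.slice_toNat _ (by omega) (by omega), pvAny_drop_take]
      refine ⟨q.toNat, ?_, ?_, ?_, ?_⟩
      · omega
      · omega
      · simp [PySem.List.length_pyRange_one]; omega
      · rw [List.getElem_map, PySem.List.getElem_pyRange_one]
        simp only [decide_eq_true_eq, zero_add]
        refine ⟨by omega, by omega, by omega, by omega, ?_⟩
        have : ((q.toNat : Int)) = q := by omega
        rw [this]
        exact h0

theorem pvB_len (m : List (List Int)) : (augmented_matrix_alt m).length = m.length := by
  simp [augmented_matrix_alt, PySem.List.length_enumerate]

theorem pvCov_lt (m : List (List Int)) (x y : Nat) (h : pvCov m x y) :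
    x < m.length ∧ (y : Int) < ((m.getD 0 []).length : Int) := by
  obtain ⟨p, q, h1, h2, h3, h4, h5, h6, h7, h8, h9⟩ := h; omega

theorem pvEnum_getElem {α : Type} (xs : List α) (d : α) (k : Nat) (hk : k < xs.length)
    (hk' : k < (PySem.List.enumerate xs 0).length) :
    (PySem.List.enumerate xs 0)[k] = ((k : Int), xs[k]) := by
  rw [List.getElem_eq_iff hk', PySem.List.enumerate_eq_map_pyRange xs d, List.getElem?_map]
  have h1 : (PySem.List.pyRange 0 ((PySem.List.len xs)) 1)[k]? = some ((0 : Int) + (k : Int)) := by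
    rw [List.getElem?_eq_getElem (by simpa [PySem.List.length_pyRange_one, PySem.List.len_eq] using hk)]
    rw [PySem.List.getElem_pyRange_one]
  rw [h1]
  simp [PySem.List.pyGetD_natCast, List.getElem?_eq_getElem hk]

theorem pvB_cell (m : List (List Int)) (x y : Nat) (hx : x < m.length)
    (hy : y < (m.getD x []).length) :
    pvPeek (augmented_matrix_alt m) x y =
      if ((y : Int) < ((PySem.List.pyGetD m 0 []).length : Int) ∧
          PySem.List.pyGetD (PySem.List.pyGetD (pvFullL m) (x : Int) []) (y : Int) false = true)
      then 0 else pvPeek m x y := by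
  have hry : y < m[x].length := by rwa [List.getD_eq_getElem _ _ hx] at hy
  rw [pvB_unfold]
  unfold pvPeek
  have hx1 : x < ((PySem.List.enumerate m 0).map (fun ir =>
      (PySem.List.enumerate ir.2 0).map (fun jv =>
        if jv.1 < ((PySem.List.pyGetD m 0 []).length : Int) ∧
            PySem.List.pyGetD (PySem.List.pyGetD (pvFullL m) ir.1 []) jv.1 false = true then 0
        else jv.2))).length := by
    simpa [PySem.List.length_enumerate] using hx
  rw [List.getD_eq_getElem _ _ hx1, List.getElem_map,
    pvEnum_getElem m [] x hx (by simpa [PySem.List.length_enumerate] using hx)]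
  have hy1 : y < ((PySem.List.enumerate m[x] 0).map (fun jv =>
      if jv.1 < ((PySem.List.pyGetD m 0 []).length : Int) ∧
          PySem.List.pyGetD (PySem.List.pyGetD (pvFullL m) ((x : Int), m[x]).1 []) jv.1 false = true
      then 0 else jv.2)).length := by
    simpa [PySem.List.length_enumerate] using hry
  rw [List.getD_eq_getElem _ _ hy1, List.getElem_map,
    pvEnum_getElem m[x] 0 y hry (by simpa [PySem.List.length_enumerate] using hry)]
  rw [List.getD_eq_getElem _ _ hx, List.getD_eq_getElem _ _ hry]

theorem pvB_cell0 (m : List (List Int)) (x y : Nat) (hx : x < m.length)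
    (hy : y < (m.getD x []).length) (h : pvCov m x y) :
    pvPeek (augmented_matrix_alt m) x y = 0 := by
  rw [pvB_cell m x y hx hy]
  have hlt := pvCov_lt m x y h
  have hyC : y < (PySem.List.pyGetD m 0 []).length := by
    rw [PySem.List.pyGetD_zero]; omega
  rw [if_pos ⟨by rw [PySem.List.pyGetD_zero]; omega, (pvFull_iff m x y hx hyC).mpr h⟩]

theorem pvB_cell1 (m : List (List Int)) (x y : Nat) (hx : x < m.length)
    (hy : y < (m.getD x []).length) (h : ¬ pvCov m x y) :
    pvPeek (augmented_matrix_alt m) x y = pvPeek m x y := by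
  rw [pvB_cell m x y hx hy]
  by_cases hyC : y < (PySem.List.pyGetD m 0 []).length
  · rw [if_neg]
    rintro ⟨-, hfull⟩
    exact h ((pvFull_iff m x y hx hyC).mp hfull)
  · rw [if_neg]
    rintro ⟨hlt, -⟩
    omega

theorem pvB_rowlen (m : List (List Int)) (x : Nat) :
    ((augmented_matrix_alt m).getD x []).length = (m.getD x []).length := by
  by_cases hx : x < m.length
  · have hx1 : x < (augmented_matrix_alt m).length := by rw [pvB_len]; exact hx
    have hrow : (augmented_matrix_alt m)[x] = (PySem.List.enumerate m[x] 0).map (fun jv =>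
        if jv.1 < ((PySem.List.pyGetD m 0 []).length : Int) ∧
            PySem.List.pyGetD (PySem.List.pyGetD (pvFullL m) (x : Int) []) jv.1 false = true
        then 0 else jv.2) := by
      rw [List.getElem_eq_iff hx1, pvB_unfold, List.getElem?_map]
      have he : x < (PySem.List.enumerate m 0).length := by
        simpa [PySem.List.length_enumerate] using hx
      rw [List.getElem?_eq_getElem he, pvEnum_getElem m [] x hx he]
      rfl
    rw [List.getD_eq_getElem _ _ hx1, List.getD_eq_getElem _ _ hx, hrow]
    simp [PySem.List.length_enumerate]
  · have hx1 : ¬ x < (augmented_matrix_alt m).length := by rw [pvB_len]; exact hx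
    rw [List.getD_eq_getElem?_getD, List.getD_eq_getElem?_getD,
      List.getElem?_eq_none (by omega), List.getElem?_eq_none (by omega)]

theorem pvPeek_eq (g : List (List Int)) (x y : Nat) (hx : x < g.length)
    (hy : y < g[x].length) : g[x][y] = pvPeek g x y := by
  unfold pvPeek
  rw [List.getD_eq_getElem _ _ hx, List.getD_eq_getElem _ _ hy]

theorem pvAB (m : List (List Int)) : augmented_matrix m = augmented_matrix_alt m := by
  apply List.ext_getElem (by rw [pvA_len, pvB_len])
  intro x hxa hxb
  have hx : x < m.length := by rwa [pvA_len] at hxa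
  apply List.ext_getElem
  · have h1 := pvA_rowlen m x
    have h2 := pvB_rowlen m x
    rw [List.getD_eq_getElem _ _ hxa, List.getD_eq_getElem _ _ hx] at h1
    rw [List.getD_eq_getElem _ _ hxb, List.getD_eq_getElem _ _ hx] at h2
    rw [h1, h2]
  · intro y hya hyb
    have hy : y < (m.getD x []).length := by
      have h1 := pvA_rowlen m x
      rw [List.getD_eq_getElem _ _ hxa] at h1
      omega
    rw [pvPeek_eq _ x y hxa hya, pvPeek_eq _ x y hxb hyb]
    by_cases hcov : pvCov m x y
    · rw [pvA_char0 m x y hcov hx hy, pvB_cell0 m x y hx hy hcov]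
    · rw [pvA_char1 m x y hcov, pvB_cell1 m x y hx hy hcov]

-- ===== VERDICT (by name: the statement is the Claim_ definition above) =====
theorem augmented_matrix_spec : Claim_equal_augmented_matrix := by
  intro m _ _
  unfold Spec_augmented_matrix
  exact pvAB m
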